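-- pv_equiv track=rewrite | github.com/WSobo/genesis_bio_mcp | src/genesis_bio_mcp/clients/sabdab.py | _extract_cdrs
-- ===== SOURCE A (Python) =====
-- def _extract_cdrs(
--     numbered: dict[str, str],
--     chain_prefix: str,
--     cdr_ranges: list[tuple[str, int, int]],
-- ) -> dict[str, str | None]:
--     """Extract CDR sequences from a numbered antibody chain.
--
--     Args:
--         numbered: Output of ``_parse_abnum`` — keys like ``"H26"``, ``"H52A"``.
--         chain_prefix: ``"H"`` for heavy, ``"L"`` for light.
--         cdr_ranges: List of (field_name, start_pos, end_pos) for Chothia CDRs.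
--
--     Returns:
--         Dict of field_name → CDR sequence string (or None if no residues found).
--     """
--     out: dict[str, str | None] = {}
--     for field, start, end in cdr_ranges:
--         residues: list[tuple[str, str]] = []
--         for pos, aa in numbered.items():
--             if not pos.startswith(chain_prefix):
--                 continue
--             # Parse numeric part; skip non-numeric suffix for range check
--             num_str = "".join(c for c in pos[len(chain_prefix) :] if c.isdigit())
--             if not num_str:
--                 continue
--             num = int(num_str)
--             if start <= num <= end:
--                 residues.append((pos, aa))
--
--         if residues:
--             # Sort by (numeric_part, insertion_letter) so insertions come in order
--             def _sort_key(item: tuple[str, str]) -> tuple[int, str]: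
--                 pos = item[0][len(chain_prefix) :]
--                 digits = "".join(c for c in pos if c.isdigit())
--                 letters = "".join(c for c in pos if c.isalpha())
--                 return (int(digits), letters)
--
--             residues.sort(key=_sort_key)
--             out[field] = "".join(aa for _, aa in residues)
--         else:
--             out[field] = None
--     return out
-- ===== SOURCE B (Python) =====
-- def _extract_cdrs(
--     numbered: dict[str, str],
--     chain_prefix: str,
--     cdr_ranges: list[tuple[str, int, int]],
-- ) -> dict[str, str | None]:
--     """Table-first variant: parse every residue once, sort the table once,
--     then answer each CDR range by a cheap filter over the sorted table."""
--     plen = len(chain_prefix)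
--     table: list[tuple[int, str, str]] = []
--     for pos, aa in numbered.items():
--         if not pos.startswith(chain_prefix):
--             continue
--         suffix = pos[plen:]
--         digits = "".join(c for c in suffix if c.isdigit())
--         if not digits:
--             continue
--         letters = "".join(c for c in suffix if c.isalpha())
--         table.append((int(digits), letters, aa))
--     table.sort(key=lambda t: (t[0], t[1]))
--     out: dict[str, str | None] = {}
--     for field, start, end in cdr_ranges:
--         sel = [aa for num, _, aa in table if start <= num <= end]
--         out[field] = "".join(sel) if sel else None
--     return out
-- ===== Notes on version B (the rewrite author's own statement) =====
-- stated objective: faster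
-- what changed: Instead of re-scanning and re-sorting all of `numbered` for every CDR range, B parses every residue once into a (num, letters, aa) table, sorts that table once, and answers each range by a single filter over the sorted table.
import Mathlib
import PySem

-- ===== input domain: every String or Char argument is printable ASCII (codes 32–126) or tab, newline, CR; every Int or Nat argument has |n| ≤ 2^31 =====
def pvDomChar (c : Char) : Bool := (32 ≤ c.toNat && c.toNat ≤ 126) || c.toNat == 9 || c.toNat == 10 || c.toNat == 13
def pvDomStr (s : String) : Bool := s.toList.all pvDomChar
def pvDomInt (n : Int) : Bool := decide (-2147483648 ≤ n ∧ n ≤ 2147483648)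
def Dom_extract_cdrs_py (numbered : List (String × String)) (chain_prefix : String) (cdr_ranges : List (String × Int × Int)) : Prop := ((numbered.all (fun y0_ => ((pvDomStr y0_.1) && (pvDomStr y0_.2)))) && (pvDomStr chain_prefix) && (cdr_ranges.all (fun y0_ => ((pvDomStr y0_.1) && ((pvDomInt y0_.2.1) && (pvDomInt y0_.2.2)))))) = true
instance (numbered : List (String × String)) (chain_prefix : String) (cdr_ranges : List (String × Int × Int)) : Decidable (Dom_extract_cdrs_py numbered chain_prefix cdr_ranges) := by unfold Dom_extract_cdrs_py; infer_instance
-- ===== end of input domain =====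

-- B replaces A's per-range rescan-and-resort of `numbered` by one parsed table built and
-- sorted once, each range then being a single filter over it (objective: faster, constant factor).

-- ===== PORT A =====
-- Python single-char c.isdigit() / c.isalpha() are Char.isDigit / Char.isAlpha on the ASCII domain;
-- pos[len(chain_prefix):] with a nonnegative start is List.drop on the char list;
-- int(num_str) is applied only to a nonempty all-digit string, where it never raises, so
-- (PySem.Int.ofChars? …).getD 0 is exact there.
def pvAKey1 (plen : Nat) (item : String × String) : Int :=
  (PySem.Int.ofChars? ((item.1.toList.drop plen).filter (fun c => c.isDigit))).getD 0

def pvAKey2 (plen : Nat) (item : String × String) : String :=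
  String.ofList ((item.1.toList.drop plen).filter (fun c => c.isAlpha))

-- the inner `for pos, aa in numbered.items():` loop of A, for one (start, end) range
def pvAResidues (numbered : List (String × String)) (chain_prefix : String) (s e : Int) : List (String × String) :=
  numbered.foldl (fun (res : List (String × String)) pa =>
    if !(PySem.Str.startswith pa.1 chain_prefix) then res
    else
      let numStr := (pa.1.toList.drop chain_prefix.toList.length).filter (fun c => c.isDigit)
      if numStr = [] then res
      else
        let num := (PySem.Int.ofChars? numStr).getD 0
        if s ≤ num ∧ num ≤ e then res ++ [pa] else res) []

def extract_cdrs_py (numbered : List (String × String)) (chain_prefix : String) (cdr_ranges : List (String × Int × Int)) : List (String × Option String) :=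
  (cdr_ranges.foldl (fun (out : PySem.Dict String (Option String)) fse =>
    let residues := pvAResidues numbered chain_prefix fse.2.1 fse.2.2
    if residues ≠ [] then
      out.insert fse.1 (some (PySem.Str.join "" ((PySem.List.sorted2 residues
        (pvAKey1 chain_prefix.toList.length) (pvAKey2 chain_prefix.toList.length)).map (fun it => it.2))))
    else out.insert fse.1 none) PySem.Dict.empty).items

-- ===== PORT B =====
-- the single `for pos, aa in numbered.items():` table-building loop of B
def pvBTable (numbered : List (String × String)) (chain_prefix : String) : List (Int × String × String) :=
  numbered.foldl (fun (t : List (Int × String × String)) pa =>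
    if !(PySem.Str.startswith pa.1 chain_prefix) then t
    else
      let suffix := pa.1.toList.drop chain_prefix.toList.length
      let digits := suffix.filter (fun c => c.isDigit)
      if digits = [] then t
      else t ++ [((PySem.Int.ofChars? digits).getD 0,
                  String.ofList (suffix.filter (fun c => c.isAlpha)), pa.2)]) []

def extract_cdrs_py_alt (numbered : List (String × String)) (chain_prefix : String) (cdr_ranges : List (String × Int × Int)) : List (String × Option String) :=
  let stable := PySem.List.sorted2 (pvBTable numbered chain_prefix) (fun t => t.1) (fun t => t.2.1)
  (cdr_ranges.foldl (fun (out : PySem.Dict String (Option String)) fse =>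
    let sel := (stable.filter (fun t => decide (fse.2.1 ≤ t.1) && decide (t.1 ≤ fse.2.2))).map (fun t => t.2.2)
    out.insert fse.1 (if sel ≠ [] then some (PySem.Str.join "" sel) else none)) PySem.Dict.empty).items

-- ===== PRECONDITION & SPEC =====
def Spec_extract_cdrs_py (numbered : List (String × String)) (chain_prefix : String) (cdr_ranges : List (String × Int × Int)) (out : List (String × Option String)) : Prop := out = extract_cdrs_py_alt numbered chain_prefix cdr_ranges
instance (numbered : List (String × String)) (chain_prefix : String) (cdr_ranges : List (String × Int × Int)) (out : List (String × Option String)) : Decidable (Spec_extract_cdrs_py numbered chain_prefix cdr_ranges out) := by unfold Spec_extract_cdrs_py; infer_instance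

-- ===== CLAIM (what is proved, stated in full; the proofs are below) =====
def Claim_equal_extract_cdrs_py : Prop := ∀ (numbered : List (String × String)) (chain_prefix : String) (cdr_ranges : List (String × Int × Int)), Dom_extract_cdrs_py numbered chain_prefix cdr_ranges → Spec_extract_cdrs_py numbered chain_prefix cdr_ranges (extract_cdrs_py numbered chain_prefix cdr_ranges)

-- ===== LEMMAS AND PROOFS =====

-- the common "parsed residue" spine: (numeric value, insertion letters, original key, amino acid)
def pvPars (chain_prefix : String) (pa : String × String) : Option (Int × String × String × String) :=
  if PySem.Str.startswith pa.1 chain_prefix then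
    let suffix := pa.1.toList.drop chain_prefix.toList.length
    let digits := suffix.filter (fun c => c.isDigit)
    if digits = [] then none
    else some ((PySem.Int.ofChars? digits).getD 0,
               String.ofList (suffix.filter (fun c => c.isAlpha)), pa.1, pa.2)
  else none

def pvInR (s e : Int) (x : Int × String × String × String) : Bool :=
  decide (s ≤ x.1) && decide (x.1 ≤ e)

def pvGPair (x : Int × String × String × String) : String × String := (x.2.2.1, x.2.2.2)

def pvGTri (x : Int × String × String × String) : Int × String × String := (x.1, x.2.1, x.2.2.2)

-- the (num, letters) lexicographic comparison used by both sorts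
def pvLt (a b : Int × String × String × String) : Bool :=
  decide (a.1 < b.1) || (!decide (b.1 < a.1) && decide (a.2.1 < b.2.1))

def pvSort (l : List (Int × String × String × String)) : List (Int × String × String × String) :=
  l.foldl (fun acc x => PySem.List.insertBy pvLt x acc) []

lemma pvLt_asymm {a b : Int × String × String × String} (h : pvLt a b = true) : pvLt b a = false := by
  unfold pvLt at *
  simp only [Bool.or_eq_true, Bool.and_eq_true, Bool.not_eq_eq_eq_not, Bool.not_true,
    decide_eq_true_eq, decide_eq_false_iff_not, Bool.or_eq_false_iff, Bool.and_eq_false_iff] at *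
  rcases h with h | ⟨h1, h2⟩
  · exact ⟨by omega, Or.inl (by simp [h])⟩
  · exact ⟨h1, Or.inr (lt_asymm h2)⟩

lemma pvLt_trans' {x y z : Int × String × String × String} (h1 : pvLt x y = true) (h2 : pvLt z y = false) :
    pvLt x z = true := by
  unfold pvLt at *
  simp only [Bool.or_eq_true, Bool.and_eq_true, Bool.not_eq_eq_eq_not, Bool.not_true,
    decide_eq_true_eq, decide_eq_false_iff_not, Bool.or_eq_false_iff, Bool.and_eq_false_iff] at *
  obtain ⟨hz1, hz2⟩ := h2
  rcases hz2 with hyz | hzy2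
  · replace hyz : y.1 < z.1 := by simpa using hyz
    rcases h1 with h | ⟨h1, _⟩
    · exact Or.inl (by omega)
    · exact Or.inl (by omega)
  · rcases h1 with h | ⟨h1, h2⟩
    · exact Or.inl (by omega)
    · by_cases hx : x.1 < z.1
      · exact Or.inl hx
      · exact Or.inr ⟨by omega, lt_of_lt_of_le h2 (not_lt.1 hzy2)⟩

-- map commutes with insertBy when the comparisons agree
lemma pv_insertBy_map {α β : Type} (bα : α → α → Bool) (bβ : β → β → Bool) (f : α → β)
    (x : α) (ys : List α) (h : ∀ y ∈ ys, bβ (f x) (f y) = bα x y) :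
    PySem.List.insertBy bβ (f x) (ys.map f) = (PySem.List.insertBy bα x ys).map f := by
  induction ys with
  | nil => simp [PySem.List.insertBy]
  | cons y ys ih =>
    simp only [List.map_cons, PySem.List.insertBy]
    rw [h y (by simp)]
    by_cases hb : bα x y
    · simp [hb]
    · rw [if_neg (by simp [hb]), if_neg (by simp [hb]), List.map_cons,
        ih (fun z hz => h z (List.mem_cons_of_mem _ hz))]

-- map commutes with the whole insertion sort when the comparisons agree on a superset L
lemma pv_sortFold_map {α β : Type} (bα : α → α → Bool) (bβ : β → β → Bool) (f : α → β) (L : List α)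
    (h : ∀ a ∈ L, ∀ b ∈ L, bβ (f a) (f b) = bα a b) :
    ∀ (l acc : List α), (∀ z ∈ l, z ∈ L) → (∀ z ∈ acc, z ∈ L) →
    (l.map f).foldl (fun acc x => PySem.List.insertBy bβ x acc) (acc.map f)
      = (l.foldl (fun acc x => PySem.List.insertBy bα x acc) acc).map f := by
  intro l
  induction l with
  | nil => intro acc _ _; simp
  | cons x xs ih =>
    intro acc hl hacc
    simp only [List.map_cons, List.foldl_cons]
    rw [pv_insertBy_map bα bβ f x acc (fun y hy => h x (hl _ (by simp)) y (hacc y hy))]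
    exact ih _ (fun z hz => hl z (List.mem_cons_of_mem _ hz))
      (fun z hz => ((PySem.List.mem_insertBy _ _ _ _).1 hz).elim
        (fun e => e ▸ hl x (by simp)) (hacc z))

lemma pv_insert_pairwise (x : Int × String × String × String) (acc : List (Int × String × String × String))
    (hacc : acc.Pairwise (fun a b => pvLt b a = false)) :
    (PySem.List.insertBy pvLt x acc).Pairwise (fun a b => pvLt b a = false) := by
  induction acc with
  | nil => simp [PySem.List.insertBy]
  | cons y ys ih =>
    obtain ⟨hy, hys⟩ := List.pairwise_cons.1 hacc
    by_cases hb : pvLt x y = true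
    · rw [show PySem.List.insertBy pvLt x (y :: ys) = x :: y :: ys by simp [PySem.List.insertBy, hb]]
      refine List.pairwise_cons.2 ⟨?_, hacc⟩
      intro z hz
      rcases List.mem_cons.1 hz with rfl | hz
      · exact pvLt_asymm hb
      · exact pvLt_asymm (pvLt_trans' hb (hy z hz))
    · rw [show PySem.List.insertBy pvLt x (y :: ys) = y :: PySem.List.insertBy pvLt x ys by
        simp [PySem.List.insertBy, hb]]
      refine List.pairwise_cons.2 ⟨?_, ih hys⟩
      intro z hz
      rcases (PySem.List.mem_insertBy _ _ _ _).1 hz with rfl | hz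
      · exact Bool.eq_false_iff.2 hb
      · exact hy z hz

lemma pv_filter_insert_pos (p : Int × String × String × String → Bool) (x : Int × String × String × String)
    (acc : List (Int × String × String × String)) (hacc : acc.Pairwise (fun a b => pvLt b a = false))
    (hx : p x = true) :
    (PySem.List.insertBy pvLt x acc).filter p = PySem.List.insertBy pvLt x (acc.filter p) := by
  induction acc with
  | nil => simp [PySem.List.insertBy, hx]
  | cons y ys ih =>
    obtain ⟨hy, hys⟩ := List.pairwise_cons.1 hacc
    by_cases hb : pvLt x y = true
    · rw [show PySem.List.insertBy pvLt x (y :: ys) = x :: y :: ys by simp [PySem.List.insertBy, hb]]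
      by_cases hp : p y = true
      · rw [List.filter_cons_of_pos hx, List.filter_cons_of_pos hp,
          show PySem.List.insertBy pvLt x (y :: List.filter p ys) = x :: y :: List.filter p ys by
            simp [PySem.List.insertBy, hb]]
      · rw [List.filter_cons_of_pos hx, List.filter_cons_of_neg (by simp [hp])]
        cases hzs : List.filter p ys with
        | nil => simp [PySem.List.insertBy]
        | cons z zs =>
          have hzmem : z ∈ ys := List.mem_of_mem_filter (hzs ▸ List.mem_cons_self ..)
          have hxz : pvLt x z = true := pvLt_trans' hb (hy z hzmem)
          simp [PySem.List.insertBy, hxz]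
    · rw [show PySem.List.insertBy pvLt x (y :: ys) = y :: PySem.List.insertBy pvLt x ys by
        simp [PySem.List.insertBy, hb]]
      by_cases hp : p y = true
      · rw [List.filter_cons_of_pos hp, List.filter_cons_of_pos hp,
          show PySem.List.insertBy pvLt x (y :: List.filter p ys) = y :: PySem.List.insertBy pvLt x (List.filter p ys) by
            simp [PySem.List.insertBy, hb],
          ih hys]
      · rw [List.filter_cons_of_neg (by simp [hp]), List.filter_cons_of_neg (by simp [hp]), ih hys]

lemma pv_filter_insert_neg (p : Int × String × String × String → Bool) (x : Int × String × String × String)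
    (acc : List (Int × String × String × String)) (hx : p x = false) :
    (PySem.List.insertBy pvLt x acc).filter p = acc.filter p := by
  induction acc with
  | nil => simp [PySem.List.insertBy, hx]
  | cons y ys ih =>
    by_cases hb : pvLt x y = true
    · rw [show PySem.List.insertBy pvLt x (y :: ys) = x :: y :: ys by simp [PySem.List.insertBy, hb]]
      simp [hx]
    · rw [show PySem.List.insertBy pvLt x (y :: ys) = y :: PySem.List.insertBy pvLt x ys by
        simp [PySem.List.insertBy, hb]]
      by_cases hp : p y = true <;> simp [hp, ih]

-- filtering commutes with the stable insertion sort
lemma pv_filter_sort (p : Int × String × String × String → Bool) :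
    ∀ (l acc : List (Int × String × String × String)), acc.Pairwise (fun a b => pvLt b a = false) →
    ((l.foldl (fun acc x => PySem.List.insertBy pvLt x acc) acc).filter p)
      = (l.filter p).foldl (fun acc x => PySem.List.insertBy pvLt x acc) (acc.filter p) := by
  intro l
  induction l with
  | nil => intro acc _; simp
  | cons x xs ih =>
    intro acc hacc
    simp only [List.foldl_cons]
    rw [ih _ (pv_insert_pairwise x acc hacc)]
    by_cases hp : p x = true
    · rw [List.filter_cons_of_pos hp, List.foldl_cons, pv_filter_insert_pos p x acc hacc hp]
    · rw [List.filter_cons_of_neg (by simp [hp]), pv_filter_insert_neg p x acc (by simp [hp])]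

-- A's inner loop is: parse everything, keep the in-range ones, project to (pos, aa)
lemma pvAResidues_eq (numbered : List (String × String)) (cp : String) (s e : Int) :
    pvAResidues numbered cp s e = ((numbered.filterMap (pvPars cp)).filter (pvInR s e)).map pvGPair := by
  unfold pvAResidues
  have key : ∀ (l acc : List (String × String)),
      l.foldl (fun (res : List (String × String)) pa =>
        if !(PySem.Str.startswith pa.1 cp) then res
        else
          let numStr := (pa.1.toList.drop cp.toList.length).filter (fun c => c.isDigit)
          if numStr = [] then res
          else
            let num := (PySem.Int.ofChars? numStr).getD 0
            if s ≤ num ∧ num ≤ e then res ++ [pa] else res) acc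
      = acc ++ ((l.filterMap (pvPars cp)).filter (pvInR s e)).map pvGPair := by
    intro l
    induction l with
    | nil => intro acc; simp
    | cons pa rest ih =>
      intro acc
      simp only [List.foldl_cons]
      by_cases h1 : PySem.Str.startswith pa.1 cp
      · by_cases h2 : (pa.1.toList.drop cp.toList.length).filter (fun c => c.isDigit) = []
        · have hpp : pvPars cp pa = none := by
            simp only [pvPars, if_pos h1, h2]
            simp
          rw [List.filterMap_cons_none hpp]
          have hhead : (if (!PySem.Str.startswith pa.1 cp) = true then acc
              else
                let numStr := (pa.1.toList.drop cp.toList.length).filter (fun c => c.isDigit)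
                if numStr = [] then acc
                else
                  let num := (PySem.Int.ofChars? numStr).getD 0
                  if s ≤ num ∧ num ≤ e then acc ++ [pa] else acc) = acc := by
            rw [if_neg (by rw [h1]; simp)]
            simp only [h2]
            simp
          rw [hhead, ih acc]
        · set num := (PySem.Int.ofChars? ((pa.1.toList.drop cp.toList.length).filter (fun c => c.isDigit))).getD 0 with hnum
          have hpp : pvPars cp pa = some (num,
              String.ofList ((pa.1.toList.drop cp.toList.length).filter (fun c => c.isAlpha)), pa.1, pa.2) := by
            simp only [pvPars, if_pos h1, if_neg h2]
            rfl
          rw [List.filterMap_cons_some hpp]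
          by_cases h3 : s ≤ num ∧ num ≤ e
          · have hhead : (if (!PySem.Str.startswith pa.1 cp) = true then acc
                else
                  let numStr := (pa.1.toList.drop cp.toList.length).filter (fun c => c.isDigit)
                  if numStr = [] then acc
                  else
                    let num := (PySem.Int.ofChars? numStr).getD 0
                    if s ≤ num ∧ num ≤ e then acc ++ [pa] else acc) = acc ++ [pa] := by
              simp only [h1, Bool.not_true, Bool.false_eq_true, if_false, if_neg h2]
              exact if_pos h3
            rw [hhead, ih (acc ++ [pa]),
              List.filter_cons_of_pos (by simp [pvInR, h3.1, h3.2]), List.map_cons]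
            simp [pvGPair]
          · have hhead : (if (!PySem.Str.startswith pa.1 cp) = true then acc
                else
                  let numStr := (pa.1.toList.drop cp.toList.length).filter (fun c => c.isDigit)
                  if numStr = [] then acc
                  else
                    let num := (PySem.Int.ofChars? numStr).getD 0
                    if s ≤ num ∧ num ≤ e then acc ++ [pa] else acc) = acc := by
              simp only [h1, Bool.not_true, Bool.false_eq_true, if_false, if_neg h2]
              exact if_neg h3
            rw [hhead, ih acc,
              List.filter_cons_of_neg (by
                simp only [pvInR]
                rcases not_and_or.1 h3 with h | h <;> simp [h])]
      · have hpp : pvPars cp pa = none := by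
          simp only [pvPars]
          exact if_neg h1
        rw [List.filterMap_cons_none hpp]
        have hhead : (if (!PySem.Str.startswith pa.1 cp) = true then acc
            else
              let numStr := (pa.1.toList.drop cp.toList.length).filter (fun c => c.isDigit)
              if numStr = [] then acc
              else
                let num := (PySem.Int.ofChars? numStr).getD 0
                if s ≤ num ∧ num ≤ e then acc ++ [pa] else acc) = acc := by
          exact if_pos (by simp only [Bool.not_eq_true', Bool.eq_false_iff]; exact h1)
        rw [hhead, ih acc]
  simpa using key numbered []

-- B's table loop is: parse everything, project to (num, letters, aa)
lemma pvBTable_eq (numbered : List (String × String)) (cp : String) :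
    pvBTable numbered cp = (numbered.filterMap (pvPars cp)).map pvGTri := by
  unfold pvBTable
  have key : ∀ (l : List (String × String)) (acc : List (Int × String × String)),
      l.foldl (fun (t : List (Int × String × String)) pa =>
        if !(PySem.Str.startswith pa.1 cp) then t
        else
          let suffix := pa.1.toList.drop cp.toList.length
          let digits := suffix.filter (fun c => c.isDigit)
          if digits = [] then t
          else t ++ [((PySem.Int.ofChars? digits).getD 0,
                      String.ofList (suffix.filter (fun c => c.isAlpha)), pa.2)]) acc
      = acc ++ (l.filterMap (pvPars cp)).map pvGTri := by
    intro l
    induction l with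
    | nil => intro acc; simp
    | cons pa rest ih =>
      intro acc
      simp only [List.foldl_cons]
      by_cases h1 : PySem.Str.startswith pa.1 cp
      · by_cases h2 : (pa.1.toList.drop cp.toList.length).filter (fun c => c.isDigit) = []
        · have hpp : pvPars cp pa = none := by
            simp only [pvPars, if_pos h1, h2]
            simp
          rw [List.filterMap_cons_none hpp]
          have hhead : (if (!PySem.Str.startswith pa.1 cp) = true then acc
              else
                let suffix := pa.1.toList.drop cp.toList.length
                let digits := suffix.filter (fun c => c.isDigit)
                if digits = [] then acc
                else acc ++ [((PySem.Int.ofChars? digits).getD 0,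
                              String.ofList (suffix.filter (fun c => c.isAlpha)), pa.2)]) = acc := by
            rw [if_neg (by rw [h1]; simp)]
            simp only [h2]
            simp
          rw [hhead, ih acc]
        · have hpp : pvPars cp pa = some ((PySem.Int.ofChars? ((pa.1.toList.drop cp.toList.length).filter (fun c => c.isDigit))).getD 0,
              String.ofList ((pa.1.toList.drop cp.toList.length).filter (fun c => c.isAlpha)), pa.1, pa.2) := by
            simp only [pvPars, if_pos h1, if_neg h2]
          rw [List.filterMap_cons_some hpp]
          have hhead : (if (!PySem.Str.startswith pa.1 cp) = true then acc
              else
                let suffix := pa.1.toList.drop cp.toList.length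
                let digits := suffix.filter (fun c => c.isDigit)
                if digits = [] then acc
                else acc ++ [((PySem.Int.ofChars? digits).getD 0,
                              String.ofList (suffix.filter (fun c => c.isAlpha)), pa.2)])
              = acc ++ [((PySem.Int.ofChars? ((pa.1.toList.drop cp.toList.length).filter (fun c => c.isDigit))).getD 0,
                         String.ofList ((pa.1.toList.drop cp.toList.length).filter (fun c => c.isAlpha)), pa.2)] := by
            simp only [h1, Bool.not_true, Bool.false_eq_true, if_false]
            exact if_neg h2
          rw [hhead, ih]
          simp [pvGTri]
      · have hpp : pvPars cp pa = none := by
          simp only [pvPars]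
          exact if_neg h1
        rw [List.filterMap_cons_none hpp]
        have hhead : (if (!PySem.Str.startswith pa.1 cp) = true then acc
            else
              let suffix := pa.1.toList.drop cp.toList.length
              let digits := suffix.filter (fun c => c.isDigit)
              if digits = [] then acc
              else acc ++ [((PySem.Int.ofChars? digits).getD 0,
                            String.ofList (suffix.filter (fun c => c.isAlpha)), pa.2)]) = acc := by
          exact if_pos (by simp only [Bool.not_eq_true', Bool.eq_false_iff]; exact h1)
        rw [hhead, ih acc]
  simpa using key numbered []

-- on parsed residues, A's recomputed sort keys are the stored fields
lemma pv_keys_of_mem {numbered : List (String × String)} {cp : String}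
    {x : Int × String × String × String} (hx : x ∈ numbered.filterMap (pvPars cp)) :
    pvAKey1 cp.toList.length (pvGPair x) = x.1 ∧ pvAKey2 cp.toList.length (pvGPair x) = x.2.1 := by
  obtain ⟨pa, hmem, hp⟩ := List.mem_filterMap.1 hx
  unfold pvPars at hp
  by_cases h1 : PySem.Str.startswith pa.1 cp
  · rw [if_pos h1] at hp
    by_cases h2 : (pa.1.toList.drop cp.toList.length).filter (fun c => c.isDigit) = []
    · simp only [h2] at hp
      simp at hp
    · rw [if_neg h2] at hp
      obtain rfl := Option.some.inj hp
      exact ⟨rfl, rfl⟩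
  · rw [if_neg h1] at hp
    simp at hp

-- the per-range value computed by A equals the one computed by B
lemma pv_val_eq (numbered : List (String × String)) (cp : String) (s e : Int) :
    (if pvAResidues numbered cp s e ≠ [] then
      some (PySem.Str.join "" ((PySem.List.sorted2 (pvAResidues numbered cp s e)
        (pvAKey1 cp.toList.length) (pvAKey2 cp.toList.length)).map (fun it => it.2)))
     else none)
    = (if ((PySem.List.sorted2 (pvBTable numbered cp) (fun t => t.1) (fun t => t.2.1)).filter
            (fun t => decide (s ≤ t.1) && decide (t.1 ≤ e))).map (fun t => t.2.2) ≠ [] then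
         some (PySem.Str.join "" (((PySem.List.sorted2 (pvBTable numbered cp) (fun t => t.1) (fun t => t.2.1)).filter
            (fun t => decide (s ≤ t.1) && decide (t.1 ≤ e))).map (fun t => t.2.2)))
       else none) := by
  have hres := pvAResidues_eq numbered cp s e
  have htab := pvBTable_eq numbered cp
  have hsortB : PySem.List.sorted2 (pvBTable numbered cp) (fun t => t.1) (fun t => t.2.1)
      = (pvSort ((numbered.filterMap (pvPars cp)))).map pvGTri := by
    rw [htab]
    exact pv_sortFold_map pvLt
      (fun a b => decide (a.1 < b.1) || (!decide (b.1 < a.1) && decide (a.2.1 < b.2.1)))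
      pvGTri (numbered.filterMap (pvPars cp)) (fun a _ b _ => rfl)
      (numbered.filterMap (pvPars cp)) [] (fun z hz => hz) (by simp)
  have hsortA : PySem.List.sorted2 (((numbered.filterMap (pvPars cp)).filter (pvInR s e)).map pvGPair)
        (pvAKey1 cp.toList.length) (pvAKey2 cp.toList.length)
      = (pvSort ((numbered.filterMap (pvPars cp)).filter (pvInR s e))).map pvGPair := by
    refine pv_sortFold_map pvLt
      (fun a b => decide (pvAKey1 cp.toList.length a < pvAKey1 cp.toList.length b) ||
        (!decide (pvAKey1 cp.toList.length b < pvAKey1 cp.toList.length a) &&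
          decide (pvAKey2 cp.toList.length a < pvAKey2 cp.toList.length b)))
      pvGPair ((numbered.filterMap (pvPars cp)).filter (pvInR s e)) ?_
      ((numbered.filterMap (pvPars cp)).filter (pvInR s e)) [] (fun z hz => hz) (by simp)
    intro a ha b hb
    obtain ⟨k1a, k2a⟩ := pv_keys_of_mem (List.mem_of_mem_filter ha)
    obtain ⟨k1b, k2b⟩ := pv_keys_of_mem (List.mem_of_mem_filter hb)
    unfold pvLt
    simp only [k1a, k1b, k2a, k2b]
  have hfilt : (pvSort (numbered.filterMap (pvPars cp))).filter (pvInR s e)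
      = pvSort ((numbered.filterMap (pvPars cp)).filter (pvInR s e)) := by
    have h := pv_filter_sort (pvInR s e) (numbered.filterMap (pvPars cp)) [] List.Pairwise.nil
    simpa only [pvSort, List.filter_nil] using h
  have hperm : (pvSort ((numbered.filterMap (pvPars cp)).filter (pvInR s e))).Perm
      ((numbered.filterMap (pvPars cp)).filter (pvInR s e)) :=
    PySem.List.sorted2_perm ((numbered.filterMap (pvPars cp)).filter (pvInR s e))
      (fun t => t.1) (fun t => t.2.1) false
  have hA : (PySem.List.sorted2 (pvAResidues numbered cp s e)
        (pvAKey1 cp.toList.length) (pvAKey2 cp.toList.length)).map (fun it => it.2)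
      = (pvSort ((numbered.filterMap (pvPars cp)).filter (pvInR s e))).map (fun x => x.2.2.2) := by
    rw [hres, hsortA, List.map_map]
    rfl
  have hB : ((PySem.List.sorted2 (pvBTable numbered cp) (fun t => t.1) (fun t => t.2.1)).filter
        (fun t => decide (s ≤ t.1) && decide (t.1 ≤ e))).map (fun t => t.2.2)
      = (pvSort ((numbered.filterMap (pvPars cp)).filter (pvInR s e))).map (fun x => x.2.2.2) := by
    rw [hsortB, List.filter_map,
      show ((fun t : Int × String × String => decide (s ≤ t.1) && decide (t.1 ≤ e)) ∘ pvGTri) = pvInR s e from rfl,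
      hfilt, List.map_map]
    rfl
  rw [hB, hA]
  have hX0 : ((pvSort ((numbered.filterMap (pvPars cp)).filter (pvInR s e))).map
        (fun x : Int × String × String × String => x.2.2.2) = [])
      ↔ (numbered.filterMap (pvPars cp)).filter (pvInR s e) = [] := by
    rw [List.map_eq_nil_iff]
    constructor
    · intro h
      have hp2 := hperm
      rw [h] at hp2
      exact hp2.symm.eq_nil
    · intro h
      rw [h]
      rfl
  have hR0 : (pvAResidues numbered cp s e = [])
      ↔ (numbered.filterMap (pvPars cp)).filter (pvInR s e) = [] := by
    rw [hres, List.map_eq_nil_iff]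
  by_cases h0 : pvAResidues numbered cp s e = []
  · rw [if_neg (not_not_intro h0), if_neg (not_not_intro (hX0.2 (hR0.1 h0)))]
  · rw [if_pos h0, if_pos (fun hX => h0 (hR0.2 (hX0.1 hX)))]


-- ===== VERDICT (by name: the statement is the Claim_ definition above) =====
theorem extract_cdrs_py_spec : Claim_equal_extract_cdrs_py := by
  intro numbered cp cdr_ranges _
  unfold Spec_extract_cdrs_py extract_cdrs_py extract_cdrs_py_alt
  refine congrArg PySem.Dict.items ?_
  refine PySem.List.foldl_congr_mem _ _ _ _ (fun out fse _ => ?_)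
  dsimp only []
  rw [← apply_ite (out.insert fse.1)]
  exact congrArg _ (pv_val_eq numbered cp fse.2.1 fse.2.2)
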